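-- pv_equiv track=rewrite | github.com/NECC/Material-Do-Curso | Cadeiras não lecionadas atualmente/Laboratório de Algoritmia II/Treinos/Treino 4/anel.py | search
-- ===== SOURCE A (Python) =====
-- def complete(n, ls):
--     return len(ls) == n
--
-- def extensions(n,ls):
--     x = ls[-1]
--     y = ls[0]
--     if len(ls) == n-1:
--         return [i for i in range(1,n+1) if i not in ls and isPrime(x+i) and isPrime(y+i)]
--     else:
--         return [i for i in range(1,n+1) if i not in ls and isPrime(x+i)]
--
-- def search(n,ls):
--     if complete(n,ls):
--         return True
--     for x in extensions(n,ls):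
--         ls.append(x)
--         if search(n,ls):
--             return True
--         ls.pop()
--     return False
--
-- def isPrime(x):
--     for p in range(2,x):
--         if x % p == 0:
--             return False
--     return True
-- ===== SOURCE B (Python) =====
-- # B: recursion over the shrinking list of unused candidates 1..n (no "i not in ls"
-- # scan at inner levels); returns the completing suffix, extends ls once on success.
-- # Mutation matches A: full arrangement in ls on success, ls unchanged on failure.
-- def search(n, ls):
--     if len(ls) == n:
--         return True
--     y = ls[0]
--
--     def prime(q):
--         return all(q % p for p in range(2, q))
--
--     def go(x, rem, need):
--         for k in range(len(rem)):
--             i = rem[k]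
--             if prime(x + i) and (need != 1 or prime(y + i)):
--                 if need == 1:
--                     return [i]
--                 tail = go(i, [j for j in rem if j != i], need - 1)
--                 if tail is not None:
--                     return [i] + tail
--         return None
--
--     tail = go(ls[-1], [i for i in range(1, n + 1) if i not in ls], n - len(ls))
--     if tail is None:
--         return False
--     ls.extend(tail)
--     return True
-- ===== Notes on version B (the rewrite author's own statement) =====
-- stated objective: alternative
-- what changed: Replaces the append/pop backtracking over ls itself (with an 'i not in ls' scan of the growing ls at every level) by a recursion over the explicit list of unused candidates 1..n, shrunk at each level, which returns the completing suffix; ls is extended once at the end on success.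
import Mathlib
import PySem

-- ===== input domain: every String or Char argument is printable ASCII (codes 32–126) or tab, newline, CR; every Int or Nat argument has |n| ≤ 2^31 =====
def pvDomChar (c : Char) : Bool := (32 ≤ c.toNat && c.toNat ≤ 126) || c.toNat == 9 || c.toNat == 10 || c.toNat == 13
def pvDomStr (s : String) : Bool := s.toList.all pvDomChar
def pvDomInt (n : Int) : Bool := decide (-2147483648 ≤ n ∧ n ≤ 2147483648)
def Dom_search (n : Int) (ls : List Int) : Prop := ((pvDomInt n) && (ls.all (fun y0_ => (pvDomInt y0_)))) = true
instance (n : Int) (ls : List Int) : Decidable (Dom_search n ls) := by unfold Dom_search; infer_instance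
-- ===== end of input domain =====

-- B replaces A's append/pop backtracking over ls (membership scan of the growing ls at each level)
-- by a recursion over the explicit list of still-unused candidates, returning the completing suffix
-- (objective: alternative, same worst-case cost). A mutates ls in place and B performs the same
-- observable mutation; the equivalence proved here is about the return value only.

def isPrimeA (x : Int) : Bool :=
  (PySem.List.pyRange 2 x 1).all (fun p => !(PySem.Int.mod x p == 0))

def extensionsA (n : Int) (ls : List Int) : List Int :=
  match PySem.List.pyGet? ls (-1), PySem.List.pyGet? ls 0 with
  | some x, some y =>
      if (ls.length : Int) == n - 1 then
        (PySem.List.pyRange 1 (n+1) 1).filter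
          (fun i => !ls.contains i && isPrimeA (x + i) && isPrimeA (y + i))
      else
        (PySem.List.pyRange 1 (n+1) 1).filter
          (fun i => !ls.contains i && isPrimeA (x + i))
  | _, _ => []

theorem extA_decrease (n : Int) (ls : List Int) (x : Int) (hx : x ∈ extensionsA n ls) :
    ((PySem.List.pyRange 1 (n+1) 1).filter (fun i => !(ls ++ [x]).contains i)).length
      < ((PySem.List.pyRange 1 (n+1) 1).filter (fun i => !ls.contains i)).length := by
  unfold extensionsA at hx
  have hx' : x ∈ PySem.List.pyRange 1 (n+1) 1 ∧ x ∉ ls := by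
    cases h1 : PySem.List.pyGet? ls (-1) with
    | none => simp [h1] at hx
    | some a =>
      cases h2 : PySem.List.pyGet? ls 0 with
      | none => simp [h1, h2] at hx
      | some b =>
        simp only [h1, h2] at hx
        split at hx <;> simp only [List.mem_filter, Bool.and_eq_true, Bool.not_eq_true',
          List.contains_eq_mem, decide_eq_false_iff_not] at hx
        · exact ⟨hx.1, hx.2.1.1⟩
        · exact ⟨hx.1, hx.2.1⟩
  obtain ⟨hmem, hnot⟩ := hx'
  have hcong : ((PySem.List.pyRange 1 (n+1) 1).filter (fun i => !(ls ++ [x]).contains i))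
      = ((PySem.List.pyRange 1 (n+1) 1).filter (fun i => !ls.contains i)).filter
          (fun i => !(i == x)) := by
    rw [List.filter_filter]
    apply List.filter_congr
    intro a _
    by_cases hax : a = x <;> by_cases hal : a ∈ ls <;> simp [hax, hal]
  rw [hcong]
  have hx2 : x ∈ (PySem.List.pyRange 1 (n+1) 1).filter (fun i => !ls.contains i) := by
    simp [List.mem_filter, hmem, hnot]
  exact List.length_filter_lt_length_iff_exists.mpr ⟨x, hx2, by simp⟩

def search (n : Int) (ls : List Int) : Bool :=
  if (ls.length : Int) == n then true
  else (extensionsA n ls).attach.any (fun x => search n (ls ++ [x.1]))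
termination_by ((PySem.List.pyRange 1 (n+1) 1).filter (fun i => !ls.contains i)).length
decreasing_by exact extA_decrease n ls x.1 x.2

def isPrimeB (q : Int) : Bool :=
  (PySem.List.pyRange 2 q 1).all (fun p => PySem.Int.mod q p != 0)

def goB (y x : Int) (rem : List Int) (k : Nat) (need : Int) : Option (List Int) :=
  if h : k < rem.length then
    let i := rem[k]
    if isPrimeB (x + i) && (need != 1 || isPrimeB (y + i)) then
      if need == 1 then some [i]
      else
        match goB y i (rem.filter (fun j => j != i)) 0 (need - 1) with
        | some tail => some (i :: tail)
        | none => goB y x rem (k + 1) need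
    else goB y x rem (k + 1) need
  else none
termination_by (rem.length, rem.length - k)
decreasing_by
  · apply Prod.Lex.left
    simp only [List.unattach_filter, List.unattach_attach]
    refine List.length_filter_lt_length_iff_exists.mpr ⟨rem[k], List.getElem_mem h, ?_⟩
    simp
  · apply Prod.Lex.right
    omega
  · apply Prod.Lex.right
    omega

def search_alt (n : Int) (ls : List Int) : Bool :=
  if (ls.length : Int) == n then true
  else
    match PySem.List.pyGet? ls 0, PySem.List.pyGet? ls (-1) with
    | some y, some x =>
        (goB y x ((PySem.List.pyRange 1 (n+1) 1).filter (fun i => !ls.contains i)) 0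
          (n - ls.length)).isSome
    | _, _ => false

-- ===== PRECONDITION & SPEC =====
-- Pre_ excludes exactly the inputs where A raises IndexError: ls == [] with n != 0 (ls[-1] on the empty list); B raises there too.
def Pre_search (n : Int) (ls : List Int) : Prop := ls ≠ [] ∨ n = 0
instance (n : Int) (ls : List Int) : Decidable (Pre_search n ls) := by unfold Pre_search; infer_instance
def pvWitness_search : Int × List Int := (4, [1])

def Spec_search (n : Int) (ls : List Int) (out : Bool) : Prop := out = search_alt n ls
instance (n : Int) (ls : List Int) (out : Bool) : Decidable (Spec_search n ls out) := by unfold Spec_search; infer_instance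

-- ===== CLAIM =====
def Claim_equal_search : Prop := ∀ (n : Int) (ls : List Int), Dom_search n ls → Pre_search n ls → Spec_search n ls (search n ls)

-- ===== LEMMAS AND PROOFS =====

def acceptB (y : Int) (rem : List Int) (need : Int) (i : Int) : Bool :=
  if need == 1 then true else (goB y i (rem.filter (fun j => j != i)) 0 (need - 1)).isSome

theorem baseFilter_append (n : Int) (ls : List Int) (x : Int) :
    ((PySem.List.pyRange 1 (n+1) 1).filter (fun i => !(ls ++ [x]).contains i))
      = ((PySem.List.pyRange 1 (n+1) 1).filter (fun i => !ls.contains i)).filter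
          (fun j => j != x) := by
  rw [List.filter_filter]
  apply List.filter_congr
  intro a _
  by_cases hax : a = x <;> by_cases hal : a ∈ ls <;> simp [hax, hal]

theorem ext_eq (n : Int) (ls : List Int) (x y : Int)
    (h1 : PySem.List.pyGet? ls (-1) = some x) (h2 : PySem.List.pyGet? ls 0 = some y) :
    extensionsA n ls
      = ((PySem.List.pyRange 1 (n+1) 1).filter (fun i => !ls.contains i)).filter
          (fun i => isPrimeB (x + i) && ((n - ls.length) != 1 || isPrimeB (y + i))) := by
  unfold extensionsA
  simp only [h1, h2]
  rw [List.filter_filter]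
  split
  case isTrue h =>
    have hlen : n - (ls.length : Int) = 1 := by
      have := beq_iff_eq.mp h; omega
    apply List.filter_congr
    intro a _
    simp only [show isPrimeA = isPrimeB from rfl, hlen]
    cases decide (a ∈ ls) <;> cases isPrimeB (x + a) <;> cases isPrimeB (y + a) <;> simp
  case isFalse h =>
    have hlen : n - (ls.length : Int) ≠ 1 := by
      intro hc; exact h (beq_iff_eq.mpr (by omega))
    have hb : (n - (ls.length : Int) != 1) = true := bne_iff_ne.mpr hlen
    apply List.filter_congr
    intro a _
    simp only [show isPrimeA = isPrimeB from rfl, hb, Bool.true_or, Bool.and_true]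
    cases decide (a ∈ ls) <;> cases isPrimeB (x + a) <;> simp

theorem goB_isSome_aux (y x : Int) (rem : List Int) (need : Int) :
    ∀ (d k : Nat), rem.length ≤ k + d →
    (goB y x rem k need).isSome
      = ((rem.drop k).filter
          (fun i => isPrimeB (x + i) && (need != 1 || isPrimeB (y + i)))).any
          (acceptB y rem need) := by
  intro d
  induction d generalizing x with
  | zero =>
    intro k hk
    rw [goB, dif_neg (by omega), List.drop_eq_nil_of_le (by omega)]
    simp
  | succ d ih =>
    intro k hk
    by_cases h : k < rem.length
    · rw [goB, dif_pos h]
      rw [List.drop_eq_getElem_cons h, List.filter_cons]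
      by_cases hc : (isPrimeB (x + rem[k]) && (need != 1 || isPrimeB (y + rem[k]))) = true
      · rw [if_pos hc, if_pos hc, List.any_cons]
        by_cases hn : (need == 1) = true
        · simp [hn, acceptB]
        · rw [if_neg hn]
          cases hdeep : goB y rem[k] (List.filter (fun j => j != rem[k]) rem) 0 (need - 1) with
          | some tail => simp [acceptB, hn, hdeep]
          | none =>
            rw [ih x (k+1) (by omega)]
            simp [acceptB, hn, hdeep]
      · rw [if_neg hc, if_neg hc]
        exact ih x (k+1) (by omega)
    · rw [goB, dif_neg h, List.drop_eq_nil_of_le (by omega)]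
      simp

theorem any_congr_mem (l : List Int) (f g : Int → Bool) (h : ∀ a ∈ l, f a = g a) :
    l.any f = l.any g := by
  induction l with
  | nil => rfl
  | cons a t ih => simp [List.any_cons, h a (by simp), ih (fun b hb => h b (by simp [hb]))]

theorem main_agree (n : Int) : ∀ (N : Nat) (ls : List Int), ls ≠ [] →
    ((PySem.List.pyRange 1 (n+1) 1).filter (fun i => !ls.contains i)).length ≤ N →
    search n ls = search_alt n ls := by
  intro N
  induction N with
  | zero =>
    intro ls hne hlen
    by_cases hl : ((ls.length : Int) == n) = true
    · rw [search, search_alt, if_pos hl, if_pos hl]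
    · have hrem : (PySem.List.pyRange 1 (n+1) 1).filter (fun i => !ls.contains i) = [] :=
        List.eq_nil_of_length_eq_zero (by omega)
      obtain ⟨y0, hy0⟩ : ∃ y0, PySem.List.pyGet? ls 0 = some y0 := by
        cases ls with
        | nil => exact absurd rfl hne
        | cons a t => exact ⟨a, PySem.List.pyGet?_zero_cons a t⟩
      obtain ⟨x0, hx0⟩ : ∃ x0, PySem.List.pyGet? ls (-1) = some x0 := by
        rw [PySem.List.pyGet?_neg_one]
        exact ⟨ls.getLast hne, List.getLast?_eq_some_getLast hne⟩
      rw [search, search_alt, if_neg hl, if_neg hl]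
      simp only [hy0, hx0]
      rw [ext_eq n ls x0 y0 hx0 hy0, hrem, goB]
      simp
  | succ N ih =>
    intro ls hne hlen
    by_cases hl : ((ls.length : Int) == n) = true
    · rw [search, search_alt, if_pos hl, if_pos hl]
    · obtain ⟨y0, hy0⟩ : ∃ y0, PySem.List.pyGet? ls 0 = some y0 := by
        cases ls with
        | nil => exact absurd rfl hne
        | cons a t => exact ⟨a, PySem.List.pyGet?_zero_cons a t⟩
      obtain ⟨x0, hx0⟩ : ∃ x0, PySem.List.pyGet? ls (-1) = some x0 := by
        rw [PySem.List.pyGet?_neg_one]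
        exact ⟨ls.getLast hne, List.getLast?_eq_some_getLast hne⟩
      rw [search, search_alt, if_neg hl, if_neg hl]
      simp only [hy0, hx0]
      rw [ext_eq n ls x0 y0 hx0 hy0]
      rw [goB_isSome_aux y0 x0
        ((PySem.List.pyRange 1 (n+1) 1).filter (fun i => !ls.contains i)) (n - ls.length)
        ((PySem.List.pyRange 1 (n+1) 1).filter (fun i => !ls.contains i)).length 0 (by omega),
        List.drop_zero]
      have hpt : ∀ i ∈ ((PySem.List.pyRange 1 (n+1) 1).filter (fun j => !ls.contains j)),
          search n (ls ++ [i])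
            = acceptB y0 ((PySem.List.pyRange 1 (n+1) 1).filter (fun j => !ls.contains j))
                (n - ls.length) i := by
        intro i hi
        by_cases hn1 : n - (ls.length : Int) = 1
        · rw [search, if_pos (by simp; omega)]
          simp [acceptB, hn1]
        · have hlen2 : ¬(((ls ++ [i]).length : Int) == n) = true := by simp; omega
          have hdec : ((PySem.List.pyRange 1 (n+1) 1).filter
              (fun j => !(ls ++ [i]).contains j)).length ≤ N := by
            rw [baseFilter_append]
            have hlt := List.length_filter_lt_length_iff_exists.mpr
              (⟨i, hi, by simp⟩ : ∃ a ∈ (PySem.List.pyRange 1 (n+1) 1).filter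
                (fun j => !ls.contains j), ¬((fun j => j != i) a = true))
            omega
          rw [ih (ls ++ [i]) (by simp) hdec]
          rw [search_alt, if_neg hlen2]
          have hy0' : PySem.List.pyGet? (ls ++ [i]) 0 = some y0 := by
            rw [PySem.List.pyGet?_zero, List.getElem?_append_left (by cases ls <;> simp_all)]
            rw [← PySem.List.pyGet?_zero, hy0]
          simp only [hy0', PySem.List.pyGet?_neg_one_append_singleton]
          rw [baseFilter_append]
          have hneed : n - ((ls ++ [i]).length : Int) = (n - ls.length) - 1 := by
            simp; omega
          rw [hneed]
          simp only [acceptB]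
          rw [if_neg (by simp [beq_iff_eq]; omega)]
      have h1 : (((PySem.List.pyRange 1 (n+1) 1).filter (fun j => !ls.contains j)).filter
            (fun i => isPrimeB (x0 + i) && ((n - ls.length) != 1 || isPrimeB (y0 + i)))).attach.any
              (fun x => search n (ls ++ [x.1]))
          = (((PySem.List.pyRange 1 (n+1) 1).filter (fun j => !ls.contains j)).filter
            (fun i => isPrimeB (x0 + i) && ((n - ls.length) != 1 || isPrimeB (y0 + i)))).any
              (fun i => search n (ls ++ [i])) := by
        simp
      rw [h1]
      apply any_congr_mem
      intro a ha
      exact hpt a (List.mem_of_mem_filter ha)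

-- ===== VERDICT =====
theorem search_spec : Claim_equal_search := by
  intro n ls _ hpre
  unfold Spec_search
  rcases eq_or_ne ls [] with rfl | hne
  · rcases hpre with h | rfl
    · exact absurd rfl h
    · rw [search, search_alt]
      simp
  · exact main_agree n _ ls hne le_rfl
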